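-- pv_equiv track=rewrite | github.com/alexprengere/advent_of_code | 2020/17/python/main.py | run_cycles
-- ===== SOURCE A (Python) =====
-- from itertools import product
--
-- def neighbors(coordinates, dim):
--     # We could have written a more generic code here.
--     # But not using the sum over a zip is actually 4x faster.
--     if dim == 3:
--         x, y, z = coordinates
--         for dx, dy, dz in product([-1, 0, 1], repeat=3):
--             if (dx, dy, dz) != (0, 0, 0):
--                 yield x + dx, y + dy, z + dz
--     elif dim == 4:
--         x, y, z, w = coordinates
--         for dx, dy, dz, dw in product([-1, 0, 1], repeat=4):
--             if (dx, dy, dz, dw) != (0, 0, 0, 0):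
--                 yield x + dx, y + dy, z + dz, w + dw
--
-- def get_adjacent_inactive_cubes(active, dim):
--     # This could be done more efficiently, but it works and it is simple.
--     inactive = set()
--     for coord in active:
--         for n in neighbors(coord, dim):
--             if n not in active:
--                 inactive.add(n)
--     return inactive
--
-- def run_cycles(active, dim, cycles):
--     for _ in range(cycles):
--         changes = {}
--         # Rule #1
--         for coord in active:
--             active_neighbors = sum(n in active for n in neighbors(coord, dim))
--             if active_neighbors not in (2, 3):
--                 changes[coord] = False
--         # Rule #2
--         for coord in get_adjacent_inactive_cubes(active, dim):
--             active_neighbors = sum(n in active for n in neighbors(coord, dim))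
--             if active_neighbors == 3:
--                 changes[coord] = True
--
--         for coord, status in changes.items():
--             if status is True:
--                 active.add(coord)
--             else:
--                 active.remove(coord)
--
--     return active
-- ===== SOURCE B (Python) =====
-- from itertools import product
--
-- def run_cycles(active, dim, cycles):
--     # Return-value equivalent to A; unlike A (which mutates its argument in
--     # place), B builds a fresh set each cycle from a single neighbor tally.
--     deltas = [d for d in product([-1, 0, 1], repeat=dim) if any(d)] if dim in (3, 4) else []
--     for _ in range(cycles):
--         counts = {}
--         for coord in active:
--             for d in deltas:
--                 n = tuple(c + dc for c, dc in zip(coord, d))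
--                 counts[n] = counts.get(n, 0) + 1
--         new_active = {c for c in active if counts.get(c, 0) in (2, 3)}
--         for n, k in counts.items():
--             if k == 3 and n not in active:
--                 new_active.add(n)
--         active = new_active
--     return active
-- ===== Notes on version B (the rewrite author's own statement) =====
-- stated objective: faster
-- what changed: Instead of re-scanning all 3^dim neighbours of every active and every adjacent cell to count its active neighbours (and patching the input set via a changes dict), B makes one pass over the active cells tallying each neighbour's count in a dict, then builds the next generation directly from that tally.
import Mathlib
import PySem

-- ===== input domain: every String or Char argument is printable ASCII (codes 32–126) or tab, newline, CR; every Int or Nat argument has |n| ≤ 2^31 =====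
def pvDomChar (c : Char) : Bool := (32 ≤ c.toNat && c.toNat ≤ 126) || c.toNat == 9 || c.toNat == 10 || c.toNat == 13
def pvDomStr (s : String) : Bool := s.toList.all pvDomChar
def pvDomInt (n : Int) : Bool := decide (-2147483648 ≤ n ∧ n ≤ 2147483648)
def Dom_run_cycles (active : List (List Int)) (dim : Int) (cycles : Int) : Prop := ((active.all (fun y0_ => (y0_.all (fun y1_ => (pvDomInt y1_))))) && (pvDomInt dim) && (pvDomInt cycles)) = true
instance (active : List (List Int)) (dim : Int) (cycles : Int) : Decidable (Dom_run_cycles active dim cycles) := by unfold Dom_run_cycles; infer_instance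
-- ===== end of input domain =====

-- B replaces A's per-cell re-scan of all 3^dim neighbours of every active and
-- adjacent cell by one tally dict of neighbour counts per cycle (return value
-- only: A mutates its argument set in place, B builds a fresh set each cycle).

-- ===== PORT A =====
def pvNeighbors (coordinates : List Int) (dim : Int) : List (List Int) :=
  if dim = 3 then
    match coordinates with
    | [x, y, z] =>
      ([-1, 0, 1] : List Int).flatMap (fun dx =>
        ([-1, 0, 1] : List Int).flatMap (fun dy =>
          ([-1, 0, 1] : List Int).filterMap (fun dz =>
            if ¬(dx = 0 ∧ dy = 0 ∧ dz = 0) then some [x + dx, y + dy, z + dz] else none)))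
    | _ => []  -- tuple unpacking raises ValueError here; excluded by Pre_
  else if dim = 4 then
    match coordinates with
    | [x, y, z, w] =>
      ([-1, 0, 1] : List Int).flatMap (fun dx =>
        ([-1, 0, 1] : List Int).flatMap (fun dy =>
          ([-1, 0, 1] : List Int).flatMap (fun dz =>
            ([-1, 0, 1] : List Int).filterMap (fun dw =>
              if ¬(dx = 0 ∧ dy = 0 ∧ dz = 0 ∧ dw = 0) then some [x + dx, y + dy, z + dz, w + dw] else none))))
    | _ => []  -- tuple unpacking raises ValueError here; excluded by Pre_
  else []

def pvGetAdjacentInactiveCubes (active : List (List Int)) (dim : Int) : PySem.Set (List Int) :=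
  active.foldl (fun inactive coord =>
    (pvNeighbors coord dim).foldl (fun inactive n =>
      if ¬ (n ∈ active) then PySem.Set.add inactive n else inactive) inactive)
    PySem.Set.empty

-- body of A's `for _ in range(cycles)` loop
def pvCycleA (active : List (List Int)) (dim : Int) : List (List Int) :=
  let changes : PySem.Dict (List Int) Bool :=
    active.foldl (fun changes coord =>
      let activeNeighbors : Int := ((pvNeighbors coord dim).map (fun n => if n ∈ active then (1 : Int) else 0)).sum
      if ¬ (activeNeighbors = 2 ∨ activeNeighbors = 3) then changes.insert coord false else changes)
      PySem.Dict.empty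
  let changes2 : PySem.Dict (List Int) Bool :=
    (pvGetAdjacentInactiveCubes active dim).foldl (fun changes coord =>
      let activeNeighbors : Int := ((pvNeighbors coord dim).map (fun n => if n ∈ active then (1 : Int) else 0)).sum
      if activeNeighbors = 3 then changes.insert coord true else changes)
      changes
  -- set.remove cannot raise KeyError here: a False key came from rule 1, hence is still present
  changes2.items.foldl (fun active cs =>
    if cs.2 = true then PySem.Set.add active cs.1 else active.erase cs.1) active

def run_cycles (active : List (List Int)) (dim : Int) (cycles : Int) : List (List Int) :=
  (PySem.List.pyRange 0 cycles 1).foldl (fun active _ => pvCycleA active dim) active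

-- ===== PORT B =====
def pvProduct101 (dim : Int) : List (List Int) :=
  if dim = 3 then
    ([-1, 0, 1] : List Int).flatMap (fun a =>
      ([-1, 0, 1] : List Int).flatMap (fun b =>
        ([-1, 0, 1] : List Int).map (fun c => [a, b, c])))
  else
    ([-1, 0, 1] : List Int).flatMap (fun a =>
      ([-1, 0, 1] : List Int).flatMap (fun b =>
        ([-1, 0, 1] : List Int).flatMap (fun c =>
          ([-1, 0, 1] : List Int).map (fun e => [a, b, c, e]))))

def pvDeltas (dim : Int) : List (List Int) :=
  if dim = 3 ∨ dim = 4 then (pvProduct101 dim).filter (fun d => d.any (fun x => x ≠ 0)) else []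

-- body of B's `for _ in range(cycles)` loop
def pvCycleB (active : List (List Int)) (deltas : List (List Int)) : List (List Int) :=
  let counts : PySem.Dict (List Int) Int :=
    active.foldl (fun counts coord =>
      deltas.foldl (fun counts d =>
        let n := List.zipWith (· + ·) coord d
        counts.insert n (counts.getD n 0 + 1)) counts)
      PySem.Dict.empty
  let newActive : PySem.Set (List Int) :=
    PySem.Set.ofList (active.filter (fun c => counts.getD c 0 = 2 ∨ counts.getD c 0 = 3))
  counts.items.foldl (fun newActive nk =>
    if nk.2 = 3 ∧ ¬ (nk.1 ∈ active) then PySem.Set.add newActive nk.1 else newActive)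
    newActive

def run_cycles_alt (active : List (List Int)) (dim : Int) (cycles : Int) : List (List Int) :=
  let deltas := pvDeltas dim
  (PySem.List.pyRange 0 cycles 1).foldl (fun active _ => pvCycleB active deltas) active

-- ===== PRECONDITION & SPEC =====
-- Pre_ excludes lists with duplicate coordinates (the argument is a Python set,
-- whose Lean encoding is a duplicate-free list) and, when at least one cycle
-- runs, coordinates whose arity differs from dim ∈ {3,4}, on which A's tuple
-- unpacking raises ValueError.
def Pre_run_cycles (active : List (List Int)) (dim : Int) (cycles : Int) : Prop :=
  active.Nodup ∧ (0 < cycles → ∀ c ∈ active, (dim = 3 → c.length = 3) ∧ (dim = 4 → c.length = 4))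
instance (active : List (List Int)) (dim : Int) (cycles : Int) : Decidable (Pre_run_cycles active dim cycles) := by unfold Pre_run_cycles; infer_instance

def pvWitness_run_cycles : List (List Int) × Int × Int := ([[0, 0, 0], [1, 0, 0], [0, 1, 0]], 3, 2)

def Spec_run_cycles (active : List (List Int)) (dim : Int) (cycles : Int) (out : List (List Int)) : Prop := out = run_cycles_alt active dim cycles
instance (active : List (List Int)) (dim : Int) (cycles : Int) (out : List (List Int)) : Decidable (Spec_run_cycles active dim cycles out) := by unfold Spec_run_cycles; infer_instance

-- ===== CLAIM (what is proved, stated in full; the proofs are below) =====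
def Claim_equal_run_cycles : Prop := ∀ (active : List (List Int)) (dim : Int) (cycles : Int), Dom_run_cycles active dim cycles → Pre_run_cycles active dim cycles → Spec_run_cycles active dim cycles (run_cycles active dim cycles)

-- ===== LEMMAS AND PROOFS =====

-- `c` has the arity cells of dimension `dim` must have (trivial unless dim ∈ {3,4})
def pvLenOk (dim : Int) (c : List Int) : Prop := (dim = 3 → c.length = 3) ∧ (dim = 4 → c.length = 4)

-- the neighbours of c, written through B's delta list
def pvNbr (dim : Int) (c : List Int) : List (List Int) :=
  (pvDeltas dim).map (fun d => List.zipWith (· + ·) c d)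

-- all neighbours of all active cells, with multiplicity
def pvFlat (active : List (List Int)) (dim : Int) : List (List Int) :=
  active.flatMap (pvNbr dim)

-- the number of active neighbours of c
abbrev pvCnt (active : List (List Int)) (dim : Int) (c : List Int) : Nat :=
  (pvNbr dim c).countP (fun x => decide (x ∈ active))

-- A's rule-1 "active neighbours" sum
abbrev pvSumA (active : List (List Int)) (dim : Int) (c : List Int) : Int :=
  ((pvNeighbors c dim).map (fun n => if n ∈ active then (1 : Int) else 0)).sum

-- the canonical value of one cycle: survivors then births, in first-seen order
def pvSurv (active : List (List Int)) (dim : Int) : List (List Int) :=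
  active.filter (fun c => decide (pvCnt active dim c = 2 ∨ pvCnt active dim c = 3))

def pvBirths (active : List (List Int)) (dim : Int) : List (List Int) :=
  (PySem.Set.ofList (pvFlat active dim)).filter
    (fun n => decide ((pvFlat active dim).count n = 3 ∧ ¬ n ∈ active))

theorem pvDeltas_empty (dim : Int) (h3 : dim ≠ 3) (h4 : dim ≠ 4) : pvDeltas dim = [] := by
  simp [pvDeltas, h3, h4]

theorem pvDeltas_nodup (dim : Int) : (pvDeltas dim).Nodup := by
  by_cases h3 : dim = 3
  · subst h3; decide
  · by_cases h4 : dim = 4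
    · subst h4; decide
    · simp [pvDeltas_empty dim h3 h4]

theorem pvDeltas_len3 : ∀ d ∈ pvDeltas 3, d.length = 3 := by decide

theorem pvDeltas_len4 : ∀ d ∈ pvDeltas 4, d.length = 4 := by decide

theorem pvDeltas_neg3 : ∀ d ∈ pvDeltas 3, d.map (fun x => -x) ∈ pvDeltas 3 := by decide

theorem pvDeltas_neg4 : ∀ d ∈ pvDeltas 4, d.map (fun x => -x) ∈ pvDeltas 4 := by decide

theorem pvZipAddCancel (c d : List Int) (h : c.length = d.length) :
    List.zipWith (· + ·) (List.zipWith (· + ·) c d) (d.map (fun x => -x)) = c := by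
  induction c generalizing d with
  | nil => simp
  | cons a c ih =>
    cases d with
    | nil => simp at h
    | cons b d =>
      simp only [List.length_cons, Nat.add_right_cancel_iff] at h
      simp only [List.zipWith_cons_cons, List.map_cons, ih d h, List.cons.injEq, and_true]
      omega

theorem pvZipAddInj (c d₁ d₂ : List Int) (h₁ : d₁.length = c.length) (h₂ : d₂.length = c.length)
    (h : List.zipWith (· + ·) c d₁ = List.zipWith (· + ·) c d₂) : d₁ = d₂ := by
  induction c generalizing d₁ d₂ with
  | nil => cases d₁ <;> cases d₂ <;> simp_all
  | cons a c ih =>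
    cases d₁ with
    | nil => simp_all
    | cons b₁ d₁ =>
      cases d₂ with
      | nil => simp_all
      | cons b₂ d₂ =>
        simp only [List.zipWith_cons_cons, List.cons.injEq] at h
        simp only [List.length_cons, Nat.add_right_cancel_iff] at h₁ h₂
        simp only [List.cons.injEq]
        exact ⟨by omega, ih d₁ d₂ h₁ h₂ h.2⟩

theorem pvNeighbors_eq (dim : Int) (c : List Int) (h : pvLenOk dim c) :
    pvNeighbors c dim = pvNbr dim c := by
  by_cases h3 : dim = 3
  · subst h3
    obtain ⟨x, y, z, rfl⟩ := List.length_eq_three.mp (h.1 rfl)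
    rfl
  · by_cases h4 : dim = 4
    · subst h4
      have hl : c.length = 4 := h.2 rfl
      match c, hl with
      | [x, y, z, w], _ => rfl
    · simp [pvNbr, pvDeltas_empty dim h3 h4, pvNeighbors, h3, h4]

theorem pvNbr_len (dim : Int) (c n : List Int) (hc : pvLenOk dim c) (hn : n ∈ pvNbr dim c) :
    pvLenOk dim n := by
  simp only [pvNbr, List.mem_map] at hn
  obtain ⟨d, hd, rfl⟩ := hn
  constructor
  · intro h3; subst h3
    simp [List.length_zipWith, hc.1 rfl, pvDeltas_len3 d hd]
  · intro h4; subst h4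
    simp [List.length_zipWith, hc.2 rfl, pvDeltas_len4 d hd]

theorem pvNbr_symm_dir (dim : Int) (c n : List Int) (hc : pvLenOk dim c)
    (hn : n ∈ pvNbr dim c) : c ∈ pvNbr dim n := by
  rcases List.mem_map.mp (by simpa [pvNbr] using hn) with ⟨d, hd, rfl⟩
  by_cases h3 : dim = 3
  · subst h3
    exact List.mem_map.mpr ⟨d.map (fun x => -x), pvDeltas_neg3 d hd,
      pvZipAddCancel c d (by rw [hc.1 rfl, pvDeltas_len3 d hd])⟩
  · by_cases h4 : dim = 4
    · subst h4
      exact List.mem_map.mpr ⟨d.map (fun x => -x), pvDeltas_neg4 d hd,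
        pvZipAddCancel c d (by rw [hc.2 rfl, pvDeltas_len4 d hd])⟩
    · simp [pvDeltas_empty dim h3 h4] at hd

theorem pvNbr_symm (dim : Int) (c n : List Int) (hc : pvLenOk dim c) (hn : pvLenOk dim n) :
    n ∈ pvNbr dim c ↔ c ∈ pvNbr dim n :=
  ⟨fun h => pvNbr_symm_dir dim c n hc h, fun h => pvNbr_symm_dir dim n c hn h⟩

theorem pvNbr_nodup (dim : Int) (c : List Int) (hc : pvLenOk dim c) : (pvNbr dim c).Nodup := by
  refine List.Nodup.map_on ?_ (pvDeltas_nodup dim)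
  intro d₁ hd₁ d₂ hd₂ heq
  by_cases h3 : dim = 3
  · subst h3
    exact pvZipAddInj c d₁ d₂ (by rw [pvDeltas_len3 d₁ hd₁, hc.1 rfl])
      (by rw [pvDeltas_len3 d₂ hd₂, hc.1 rfl]) heq
  · by_cases h4 : dim = 4
    · subst h4
      exact pvZipAddInj c d₁ d₂ (by rw [pvDeltas_len4 d₁ hd₁, hc.2 rfl])
        (by rw [pvDeltas_len4 d₂ hd₂, hc.2 rfl]) heq
    · simp [pvDeltas_empty dim h3 h4] at hd₁

theorem pvCountNodup (l : List (List Int)) (h : l.Nodup) (a : List Int) :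
    l.count a = if a ∈ l then 1 else 0 := by
  by_cases hm : a ∈ l
  · simp [hm, List.count_eq_one_of_mem h hm]
  · simp [hm, List.count_eq_zero_of_not_mem hm]

theorem pvInterCountP (l₁ l₂ : List (List Int)) (h₁ : l₁.Nodup) (h₂ : l₂.Nodup) :
    l₁.countP (fun x => decide (x ∈ l₂)) = l₂.countP (fun x => decide (x ∈ l₁)) := by
  have key : ∀ (a b : List (List Int)), a.Nodup →
      a.countP (fun x => decide (x ∈ b)) = (a.toFinset ∩ b.toFinset).card := by
    intro a b ha
    rw [List.countP_eq_length_filter, ← List.toFinset_card_of_nodup (ha.filter _),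
      List.toFinset_filter]
    congr 1
    ext x
    simp [List.mem_toFinset]
  rw [key l₁ l₂ h₁, key l₂ l₁ h₂, Finset.inter_comm]

theorem pvSumIte {α : Type} (p : α → Prop) [DecidablePred p] (l : List α) :
    (l.map (fun x => if p x then (1 : Nat) else 0)).sum = l.countP (fun x => decide (p x)) := by
  induction l with
  | nil => rfl
  | cons a l ih => by_cases h : p a <;> simp [h, ih] <;> omega

theorem pvSumIteInt {α : Type} (p : α → Prop) [DecidablePred p] (l : List α) :
    (l.map (fun x => if p x then (1 : Int) else 0)).sum = (l.countP (fun x => decide (p x)) : Int) := by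
  induction l with
  | nil => rfl
  | cons a l ih => by_cases h : p a <;> simp [h, ih] <;> omega

theorem pvFoldlIf {α β : Type} (p : α → Prop) [DecidablePred p] (f : β → α → β) (l : List α) (init : β) :
    l.foldl (fun acc x => if p x then f acc x else acc) init
      = (l.filter (fun x => decide (p x))).foldl f init := by
  rw [List.foldl_filter]
  simp only [decide_eq_true_eq]

theorem pvFoldlAddDisj : ∀ (bs : List (List Int)) (s : List (List Int)), bs.Nodup →
    (∀ x ∈ bs, ¬ x ∈ s) → bs.foldl PySem.Set.add s = s ++ bs := by
  intro bs
  induction bs with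
  | nil => intro s _ _; simp
  | cons a bs ih =>
    intro s hnd hdisj
    have hadd : PySem.Set.add s a = s ++ [a] := by
      simp [PySem.Set.add, PySem.Set.contains, hdisj a (by simp)]
    simp only [List.foldl_cons, hadd]
    rw [ih (s ++ [a]) hnd.of_cons ?_]
    · simp
    · intro x hx
      simp only [List.mem_append, List.mem_singleton]
      rintro (hxs | rfl)
      · exact hdisj x (by simp [hx]) hxs
      · exact (List.nodup_cons.mp hnd).1 hx

theorem pvOfListNodup (l : List (List Int)) (h : l.Nodup) : PySem.Set.ofList l = l := by
  rw [PySem.Set.ofList_eq_foldl, pvFoldlAddDisj l [] h (by simp)]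
  rfl

theorem pvFilterFoldAdd (p : List Int → Bool) : ∀ (l s : List (List Int)),
    (l.foldl PySem.Set.add s).filter p = (l.filter p).foldl PySem.Set.add (s.filter p) := by
  intro l
  induction l with
  | nil => intro s; rfl
  | cons a l ih =>
    intro s
    simp only [List.foldl_cons]
    rw [ih (PySem.Set.add s a)]
    by_cases hpa : p a = true
    · rw [List.filter_cons_of_pos hpa]
      simp only [List.foldl_cons]
      congr 1
      by_cases hm : a ∈ s
      · have hmf : a ∈ s.filter p := List.mem_filter.mpr ⟨hm, hpa⟩
        simp [PySem.Set.add, PySem.Set.contains, hm, hmf]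
      · have hmf : ¬ a ∈ s.filter p := fun hc => hm (List.mem_filter.mp hc).1
        simp [PySem.Set.add, PySem.Set.contains, hm, hmf, List.filter_append, hpa]
    · rw [List.filter_cons_of_neg (by simpa using hpa)]
      congr 1
      by_cases hm : a ∈ s
      · simp [PySem.Set.add, PySem.Set.contains, hm]
      · simp [PySem.Set.add, PySem.Set.contains, hm, List.filter_append, hpa]

theorem pvOfListFilter (p : List Int → Bool) (l : List (List Int)) :
    PySem.Set.ofList (l.filter p) = (PySem.Set.ofList l).filter p := by
  rw [PySem.Set.ofList_eq_foldl, PySem.Set.ofList_eq_foldl, pvFilterFoldAdd]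
  rfl

theorem pvItemsFoldIf (p : List Int → Prop) [DecidablePred p] (v : Bool) :
    ∀ (l : List (List Int)) (d : PySem.Dict (List Int) Bool), l.Nodup →
    (∀ x ∈ l, d.contains x = false) →
    (l.foldl (fun d x => if p x then d.insert x v else d) d).items
      = d.items ++ (l.filter (fun x => decide (p x))).map (fun x => (x, v)) := by
  intro l
  induction l with
  | nil => intro d _ _; simp
  | cons a l ih =>
    intro d hnd hfresh
    have hal : a ∉ l := (List.nodup_cons.mp hnd).1
    have hca : d.contains a = false := hfresh a (by simp)
    have hins : (d.insert a v).items = d.items ++ [(a, v)] := by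
      simp [PySem.Dict.insert, hca]
    simp only [List.foldl_cons, List.filter_cons]
    by_cases hp : p a
    · rw [if_pos hp]
      have hfresh' : ∀ x ∈ l, (d.insert a v).contains x = false := by
        intro x hx
        have h1x : d.contains x = false := hfresh x (by simp [hx])
        simp only [PySem.Dict.contains] at h1x ⊢
        have hax : (a == x) = false := beq_eq_false_iff_ne.mpr (fun h => hal (h ▸ hx))
        simp [hins, List.any_append, h1x, hax]
      rw [ih (d.insert a v) hnd.of_cons hfresh', hins]
      simp [hp]
    · rw [if_neg hp]
      have hfresh' : ∀ x ∈ l, d.contains x = false := fun x hx => hfresh x (by simp [hx])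
      rw [ih d hnd.of_cons hfresh']
      simp [hp]

theorem pvFoldlErase : ∀ (r : List (List Int)) (l : List (List Int)), l.Nodup →
    r.foldl (fun l x => l.erase x) l = l.filter (fun x => decide (¬ x ∈ r)) := by
  intro r
  induction r with
  | nil => intro l _; simp
  | cons a r ih =>
    intro l hnd
    simp only [List.foldl_cons]
    rw [ih (l.erase a) (hnd.erase a), List.Nodup.erase_eq_filter hnd a, List.filter_filter]
    apply List.filter_congr
    intro x _
    by_cases hxa : x = a <;> by_cases hxr : x ∈ r <;> simp [hxa, hxr, List.mem_cons]

theorem pvCycle_eq (active : List (List Int)) (dim : Int)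
    (hnd : active.Nodup) (hlen : ∀ c ∈ active, pvLenOk dim c) :
    pvCycleA active dim = pvCycleB active (pvDeltas dim) ∧
    (pvCycleB active (pvDeltas dim)).Nodup ∧
    (∀ c ∈ pvCycleB active (pvDeltas dim), pvLenOk dim c) := by
  have hlenF : ∀ n ∈ pvFlat active dim, pvLenOk dim n := by
    intro n hn
    obtain ⟨a, ha, hna⟩ := List.mem_flatMap.mp (by simpa [pvFlat] using hn)
    exact pvNbr_len dim a n (hlen a ha) hna
  have hcounts : (active.foldl (fun counts coord =>
      (pvDeltas dim).foldl (fun counts d =>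
        counts.insert (List.zipWith (· + ·) coord d)
          (counts.getD (List.zipWith (· + ·) coord d) 0 + 1)) counts)
      PySem.Dict.empty) = PySem.Dict.counter (pvFlat active dim) := by
    rw [PySem.Dict.counter_eq_foldl, pvFlat, List.foldl_flatMap]
    refine List.foldl_ext _ _ _ (fun acc coord _ => ?_)
    rw [pvNbr, List.foldl_map]
    rfl
  have hcount : ∀ n, pvLenOk dim n →
      (pvFlat active dim).count n = pvCnt active dim n := by
    intro n hn
    rw [pvFlat, List.count_flatMap]
    have h1 : active.map (List.count n ∘ pvNbr dim)
        = active.map (fun a => if n ∈ pvNbr dim a then 1 else 0) :=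
      List.map_congr_left (fun a ha => by
        simp only [Function.comp_apply]
        exact pvCountNodup _ (pvNbr_nodup dim a (hlen a ha)) n)
    rw [h1, pvSumIte]
    rw [List.countP_congr (q := fun a => decide (a ∈ pvNbr dim n)) (fun a ha => by
      simp only [decide_eq_true_eq]
      exact pvNbr_symm dim a n (hlen a ha) hn)]
    exact pvInterCountP active (pvNbr dim n) hnd (pvNbr_nodup dim n hn)
  have hs1 : ∀ c ∈ active, pvSumA active dim c = (pvCnt active dim c : Int) := by
    intro c hc
    show ((pvNeighbors c dim).map _).sum = _
    rw [pvNeighbors_eq dim c (hlen c hc), pvSumIteInt]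
  have hs2 : ∀ n ∈ PySem.Set.ofList (pvFlat active dim),
      pvSumA active dim n = ((pvFlat active dim).count n : Int) := by
    intro n hn
    have hmem := (PySem.Set.mem_ofList _ _).mp hn
    have hlenn := hlenF n hmem
    show ((pvNeighbors n dim).map _).sum = _
    rw [pvNeighbors_eq dim n hlenn, pvSumIteInt, hcount n hlenn]
  -- B's cycle body
  have hB : pvCycleB active (pvDeltas dim) = pvSurv active dim ++ pvBirths active dim := by
    simp only [pvCycleB]
    rw [hcounts]
    have hfiltB : active.filter (fun c =>
        decide ((PySem.Dict.counter (pvFlat active dim)).getD c 0 = 2 ∨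
                (PySem.Dict.counter (pvFlat active dim)).getD c 0 = 3)) = pvSurv active dim := by
      apply List.filter_congr
      intro c hc
      rw [PySem.Dict.getD_counter, hcount c (hlen c hc), decide_eq_decide]
      omega
    rw [hfiltB, PySem.Dict.items_counter, List.foldl_map]
    rw [List.foldl_ext _ (fun (na : List (List Int)) (n : List Int) =>
        if ((pvFlat active dim).count n : Int) = 3 ∧ ¬ n ∈ active
        then PySem.Set.add na n else na) _ (fun acc n _ => rfl)]
    rw [pvFoldlIf (p := fun n => ((pvFlat active dim).count n : Int) = 3 ∧ ¬ n ∈ active)]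
    rw [pvOfListNodup (pvSurv active dim) (by unfold pvSurv; exact hnd.filter _)]
    rw [pvFoldlAddDisj _ (pvSurv active dim)
      (((PySem.Set.nodup_ofList _).filter _))
      (fun x hx hxs => by
        have hxna : ¬ x ∈ active := by
          have := (List.mem_filter.mp hx).2
          simp only [decide_eq_true_eq] at this
          exact this.2
        exact hxna ((List.mem_filter.mp hxs).1))]
    congr 1
    apply List.filter_congr
    intro n _
    rw [decide_eq_decide]
    constructor
    · rintro ⟨h1, h2⟩; exact ⟨by exact_mod_cast h1, h2⟩
    · rintro ⟨h1, h2⟩; exact ⟨by exact_mod_cast h1, h2⟩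
  -- A's cycle body
  have hA : pvCycleA active dim = pvSurv active dim ++ pvBirths active dim := by
    have hinact : pvGetAdjacentInactiveCubes active dim
        = (PySem.Set.ofList (pvFlat active dim)).filter (fun n => decide (¬ n ∈ active)) := by
      unfold pvGetAdjacentInactiveCubes
      rw [List.foldl_ext _ (fun (inactive : List (List Int)) (coord : List Int) =>
          (pvNbr dim coord).foldl (fun inactive n =>
            if ¬ n ∈ active then PySem.Set.add inactive n else inactive) inactive) _
          (fun acc c hc => by rw [pvNeighbors_eq dim c (hlen c hc)])]
      rw [← List.foldl_flatMap]
      rw [pvFoldlIf (p := fun n => ¬ n ∈ active)]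
      rw [show (PySem.Set.empty : PySem.Set (List Int)) = ([] : List (List Int)) from rfl]
      rw [← PySem.Set.ofList_eq_foldl]
      rw [show active.flatMap (pvNbr dim) = pvFlat active dim from rfl]
      rw [pvOfListFilter]
    simp only [pvCycleA]
    rw [hinact]
    rw [pvItemsFoldIf (fun c => pvSumA active dim c = 3) true _ _
      (((PySem.Set.nodup_ofList _).filter _)) ?hfresh2]
    case hfresh2 =>
      intro x hx
      have hxna : ¬ x ∈ active := by
        have := (List.mem_filter.mp hx).2
        simpa using this
      simp only [PySem.Dict.contains]
      rw [pvItemsFoldIf (fun c => ¬ (pvSumA active dim c = 2 ∨ pvSumA active dim c = 3)) false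
        active PySem.Dict.empty hnd (fun y _ => by simp [PySem.Dict.contains, PySem.Dict.empty])]
      simp only [PySem.Dict.empty, List.nil_append, List.any_map]
      rw [List.any_eq_false]
      intro c hc
      have hcact : c ∈ active := (List.mem_filter.mp hc).1
      simp only [Function.comp_apply, beq_iff_eq]
      intro h
      exact hxna (h ▸ hcact)
    rw [pvItemsFoldIf (fun c => ¬ (pvSumA active dim c = 2 ∨ pvSumA active dim c = 3)) false
      active PySem.Dict.empty hnd (fun y _ => by simp [PySem.Dict.contains, PySem.Dict.empty])]
    simp only [PySem.Dict.empty, List.nil_append]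
    rw [List.foldl_append, List.foldl_map, List.foldl_map]
    rw [List.foldl_ext (fun (act : List (List Int)) (x : List Int) =>
        if ((x, false).2 = true) then PySem.Set.add act (x, false).1 else act.erase (x, false).1)
        (fun (act : List (List Int)) (x : List Int) => act.erase x) active
        (fun acc x _ => by simp)]
    rw [pvFoldlErase _ active hnd]
    rw [List.foldl_ext (fun (act : List (List Int)) (x : List Int) =>
        if (((x, true).2 : Bool) = true) then PySem.Set.add act (x, true).1 else act.erase (x, true).1)
        (fun (act : List (List Int)) (x : List Int) => PySem.Set.add act x) _
        (fun acc x _ => by simp)]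
    have hsurv : active.filter (fun x => decide (¬ x ∈ active.filter
        (fun c => decide (¬ (pvSumA active dim c = 2 ∨ pvSumA active dim c = 3)))))
        = pvSurv active dim := by
      apply List.filter_congr
      intro c hc
      rw [decide_eq_decide, List.mem_filter]
      rw [hs1 c hc]
      simp only [hc, true_and, decide_eq_true_eq]
      constructor
      · intro h
        by_contra hcnt
        exact h (fun hor => hcnt (by exact_mod_cast hor))
      · intro h hneg
        exact hneg (by exact_mod_cast h)
    rw [hsurv]
    rw [pvFoldlAddDisj _ (pvSurv active dim) ?bnodup ?bdisj]
    case bnodup =>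
      exact ((PySem.Set.nodup_ofList _).filter _).filter _
    case bdisj =>
      intro x hx hxs
      have hxna : ¬ x ∈ active := by
        have := (List.mem_filter.mp (List.mem_filter.mp hx).1).2
        simpa using this
      exact hxna ((List.mem_filter.mp hxs).1)
    congr 1
    rw [List.filter_filter]
    unfold pvBirths
    apply List.filter_congr
    intro n hn
    rw [hs2 n hn]
    have hcast : (((pvFlat active dim).count n : Int) = 3) ↔ ((pvFlat active dim).count n = 3) := by
      omega
    by_cases h3 : (pvFlat active dim).count n = 3 <;>
      by_cases hna : n ∈ active <;>
        simp [h3, hna, hcast]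
  refine ⟨hA.trans hB.symm, ?_, ?_⟩
  · rw [hB]
    refine List.Nodup.append (hnd.filter _) (((PySem.Set.nodup_ofList _).filter _)) ?_
    intro x hx1 hx2
    have hxa : x ∈ active := (List.mem_filter.mp hx1).1
    have hxna : ¬ x ∈ active := by
      have := (List.mem_filter.mp hx2).2
      simp only [decide_eq_true_eq] at this
      exact this.2
    exact hxna hxa
  · intro c hc
    rw [hB] at hc
    rcases List.mem_append.mp hc with h | h
    · exact hlen c (List.mem_filter.mp h).1
    · exact hlenF c ((PySem.Set.mem_ofList _ _).mp (List.mem_filter.mp h).1)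

theorem pvLoop_eq (l : List Int) (active : List (List Int)) (dim : Int)
    (hnd : active.Nodup) (hlen : ∀ c ∈ active, pvLenOk dim c) :
    l.foldl (fun a _ => pvCycleA a dim) active = l.foldl (fun a _ => pvCycleB a (pvDeltas dim)) active := by
  induction l generalizing active with
  | nil => rfl
  | cons x l ih =>
    obtain ⟨heq, hnd2, hlen2⟩ := pvCycle_eq active dim hnd hlen
    simp only [List.foldl_cons, heq]
    exact ih _ hnd2 hlen2

theorem pvPyRange_nil (c : Int) (h : c ≤ 0) : PySem.List.pyRange 0 c 1 = [] := by
  simp [PySem.List.pyRange]; omega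

-- ===== VERDICT (by name: the statement is the Claim_ definition above) =====
theorem run_cycles_spec : Claim_equal_run_cycles := by
  intro active dim cycles _ hpre
  unfold Spec_run_cycles run_cycles run_cycles_alt
  by_cases hc : 0 < cycles
  · exact pvLoop_eq _ active dim hpre.1 (fun c hcm => hpre.2 hc c hcm)
  · rw [pvPyRange_nil cycles (by omega)]
    rfl
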